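-- pv_equiv track=rewrite | github.com/brineylab/ghostfold | src/ghostfold/core/colabfold.py | _get_colabfold_total_models
-- ===== SOURCE A (Python) =====
-- def _get_colabfold_total_models(params: list) -> int:
--     """Extract --num-models * --num-seeds from the ColabFold param list."""
--     num_models = 5
--     num_seeds = 1
--     for i, p in enumerate(params):
--         if p == "--num-models" and i + 1 < len(params):
--             num_models = int(params[i + 1])
--         elif p == "--num-seeds" and i + 1 < len(params):
--             num_seeds = int(params[i + 1])
--     return num_models * num_seeds
-- ===== SOURCE B (Python) =====
-- def _get_colabfold_total_models(params: list) -> int: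
--     """Extract --num-models * --num-seeds from the ColabFold param list."""
--     def last_flag_value(flag, default):
--         for i in reversed(range(len(params) - 1)):
--             if params[i] == flag:
--                 return int(params[i + 1])
--         return default
--     return last_flag_value("--num-models", 5) * last_flag_value("--num-seeds", 1)
-- ===== Notes on version B (the rewrite author's own statement) =====
-- stated objective: alternative
-- what changed: B replaces A's single forward scan that overwrites two scalars (parsing every flag value it meets) by two independent backward searches that stop at the first hit from the end and parse only that last value.
import Mathlib
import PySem

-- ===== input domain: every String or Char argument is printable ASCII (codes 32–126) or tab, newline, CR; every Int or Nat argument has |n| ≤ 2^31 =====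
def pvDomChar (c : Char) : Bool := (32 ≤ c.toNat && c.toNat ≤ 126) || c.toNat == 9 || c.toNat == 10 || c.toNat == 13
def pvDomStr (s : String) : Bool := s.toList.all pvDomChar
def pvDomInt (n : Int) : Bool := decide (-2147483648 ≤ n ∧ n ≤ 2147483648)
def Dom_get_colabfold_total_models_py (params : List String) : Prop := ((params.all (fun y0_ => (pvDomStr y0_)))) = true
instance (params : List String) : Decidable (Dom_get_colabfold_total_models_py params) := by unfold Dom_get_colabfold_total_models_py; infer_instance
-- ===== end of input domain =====

-- B replaces A's forward overwrite scan by two independent backward searches that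
-- stop at the first hit from the end and parse only that value (alternative; same cost).

-- ===== PORT A =====
def get_colabfold_total_models_py (params : List String) : Int :=
  let st := (PySem.List.enumerate params).foldl
    (fun (st : Int × Int) ip =>
      if ip.2 = "--num-models" ∧ ip.1 + 1 < PySem.List.len params then
        (((PySem.List.pyGet? params (ip.1 + 1)).bind PySem.Int.ofStr?).getD st.1, st.2)
      else if ip.2 = "--num-seeds" ∧ ip.1 + 1 < PySem.List.len params then
        (st.1, ((PySem.List.pyGet? params (ip.1 + 1)).bind PySem.Int.ofStr?).getD st.2)
      else st)
    (5, 1)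
  st.1 * st.2

-- ===== PORT B =====
-- 'for i in reversed(range(len(params) - 1)): if params[i] == flag: return int(params[i+1])'
-- transcribed as a countdown recursion: fuel m visits i = m-1, m-2, …, 0 and stops at the first hit.
def pvLastFlagValue (params : List String) (flag : String) (default : Int) : Nat → Int
  | 0 => default
  | m + 1 =>
    if PySem.List.pyGet? params (m : Int) = some flag then
      ((PySem.List.pyGet? params ((m : Int) + 1)).bind PySem.Int.ofStr?).getD 0
    else pvLastFlagValue params flag default m

def get_colabfold_total_models_py_alt (params : List String) : Int :=
  pvLastFlagValue params "--num-models" 5 (params.length - 1) *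
  pvLastFlagValue params "--num-seeds" 1 (params.length - 1)

-- ===== PRECONDITION & SPEC =====
-- Pre_ excludes exactly the inputs on which A raises ValueError: some value directly
-- following a "--num-models"/"--num-seeds" token is not int-parseable.
def Pre_get_colabfold_total_models_py (params : List String) : Prop :=
  ∀ pr ∈ params.zip (params.drop 1),
    (pr.1 = "--num-models" ∨ pr.1 = "--num-seeds") → (PySem.Int.ofStr? pr.2).isSome = true
instance (params : List String) : Decidable (Pre_get_colabfold_total_models_py params) := by
  unfold Pre_get_colabfold_total_models_py; infer_instance

def pvWitness_get_colabfold_total_models_py : List String := ["--num-models", "3"]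

def Spec_get_colabfold_total_models_py (params : List String) (out : Int) : Prop :=
  out = get_colabfold_total_models_py_alt params
instance (params : List String) (out : Int) : Decidable (Spec_get_colabfold_total_models_py params out) := by
  unfold Spec_get_colabfold_total_models_py; infer_instance

-- ===== CLAIM (what is proved, stated in full; the proofs are below) =====
def Claim_equal_get_colabfold_total_models_py : Prop :=
  ∀ (params : List String), Dom_get_colabfold_total_models_py params →
    Pre_get_colabfold_total_models_py params →
    Spec_get_colabfold_total_models_py params (get_colabfold_total_models_py params)

-- ===== LEMMAS AND PROOFS =====

-- A's per-pair step, with the always-true-inside-zip index check removed.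
def pvStepZ (st : Int × Int) (pr : String × String) : Int × Int :=
  if pr.1 = "--num-models" then ((PySem.Int.ofStr? pr.2).getD st.1, st.2)
  else if pr.1 = "--num-seeds" then (st.1, (PySem.Int.ofStr? pr.2).getD st.2)
  else st

-- single-flag step used to split the pair fold componentwise
def pvStepF (flag : String) (v : Int) (pr : String × String) : Int :=
  if pr.1 = flag then (PySem.Int.ofStr? pr.2).getD v else v

-- A's enumerate-fold over a suffix equals the pvStepZ-fold over the adjacent pairs of that suffix.
lemma pvFoldA_suffix (params : List String) :
    ∀ (l : List String) (k : Nat) (st : Int × Int), params.drop k = l →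
    (PySem.List.enumerate l (k : Int)).foldl
      (fun (st : Int × Int) ip =>
        if ip.2 = "--num-models" ∧ ip.1 + 1 < PySem.List.len params then
          (((PySem.List.pyGet? params (ip.1 + 1)).bind PySem.Int.ofStr?).getD st.1, st.2)
        else if ip.2 = "--num-seeds" ∧ ip.1 + 1 < PySem.List.len params then
          (st.1, ((PySem.List.pyGet? params (ip.1 + 1)).bind PySem.Int.ofStr?).getD st.2)
        else st) st
    = (l.zip (params.drop (k + 1))).foldl pvStepZ st := by
  intro l
  induction l with
  | nil => intro k st _; simp [PySem.List.enumerate]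
  | cons x l' ih =>
    intro k st hdrop
    have hk : k < params.length := by
      by_contra h
      rw [List.drop_eq_nil_of_le (by omega)] at hdrop
      exact List.cons_ne_nil _ _ hdrop.symm
    have hdrop' : params.drop (k + 1) = l' := by
      have := congrArg (List.drop 1) hdrop
      simpa [List.drop_drop, Nat.add_comm] using this
    rw [PySem.List.enumerate_cons]
    cases l' with
    | nil =>
      have hlen : params.length = k + 1 := by
        have h1 : params.length ≤ k + 1 := List.drop_eq_nil_iff.mp hdrop'
        omega
      have hcond : ¬ ((k : Int) + 1 < (params.length : Int)) := by
        rw [hlen]; push_cast; omega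
      simp [hcond, hdrop']
    | cons y l'' =>
      have hlen2 : k + 1 < params.length := by
        by_contra h
        have hnil : params.drop (k + 1) = [] := List.drop_eq_nil_iff.mpr (by omega)
        rw [hnil] at hdrop'
        exact List.cons_ne_nil _ _ hdrop'.symm
      have hdrop'' : params.drop (k + 1 + 1) = l'' := by
        have h := congrArg (List.drop 1) hdrop'
        simpa [List.drop_drop] using h
      have hget : PySem.List.pyGet? params ((k : Int) + 1) = some y := by
        have hcast : (k : Int) + 1 = ((k + 1 : Nat) : Int) := by push_cast; ring
        rw [hcast, PySem.List.pyGet?_natCast]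
        have : params[k+1]? = (params.drop (k+1))[0]? := by
          simp [List.getElem?_drop]
        rw [this, hdrop']
        rfl
      have hlt : (k : Int) + 1 < (params.length : Int) := by exact_mod_cast hlen2
      simp only [List.foldl_cons]
      rw [hdrop']
      have hzip : (x :: y :: l'').zip (y :: l'') = (x, y) :: ((y :: l'').zip l'') := rfl
      rw [hzip]
      simp only [List.foldl_cons]
      have hstep : (if x = "--num-models" ∧ (k : Int) + 1 < PySem.List.len params then
            (((PySem.List.pyGet? params ((k : Int) + 1)).bind PySem.Int.ofStr?).getD st.1, st.2)
          else if x = "--num-seeds" ∧ (k : Int) + 1 < PySem.List.len params then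
            (st.1, ((PySem.List.pyGet? params ((k : Int) + 1)).bind PySem.Int.ofStr?).getD st.2)
          else st) = pvStepZ st (x, y) := by
        simp [pvStepZ, hget, hlt]
      rw [hstep]
      have hcast : (k : Int) + 1 = ((k + 1 : Nat) : Int) := by push_cast; ring
      rw [hcast, ih (k + 1) (pvStepZ st (x, y)) hdrop']
      rw [hdrop'']

-- pair fold splits into two independent single-flag folds
lemma pvFold_pair : ∀ (L : List (String × String)) (m0 s0 : Int),
    L.foldl pvStepZ (m0, s0) =
      (L.foldl (pvStepF "--num-models") m0, L.foldl (pvStepF "--num-seeds") s0) := by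
  intro L
  induction L with
  | nil => intro m0 s0; rfl
  | cons pr L' ih =>
    intro m0 s0
    simp only [List.foldl_cons]
    by_cases h1 : pr.1 = "--num-models"
    · rw [show pvStepZ (m0, s0) pr = ((PySem.Int.ofStr? pr.2).getD m0, s0) by
        simp [pvStepZ, h1]]
      rw [ih]
      congr 1 <;> simp [pvStepF, h1]
    · by_cases h2 : pr.1 = "--num-seeds"
      · rw [show pvStepZ (m0, s0) pr = (m0, (PySem.Int.ofStr? pr.2).getD s0) by
          simp [pvStepZ, h2]]
        rw [ih]
        congr 1 <;> simp [pvStepF, h2]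
      · rw [show pvStepZ (m0, s0) pr = (m0, s0) by simp [pvStepZ, h1, h2]]
        rw [ih]
        congr 1 <;> simp [pvStepF, h1, h2]

-- backward early-exit search equals the forward overwrite fold over the first m adjacent pairs
lemma pvLastFlagValue_eq (params : List String) (flag : String) (d : Int)
    (hpre : ∀ pr ∈ params.zip (params.drop 1), pr.1 = flag →
        (PySem.Int.ofStr? pr.2).isSome = true) :
    ∀ m, m ≤ (params.zip (params.drop 1)).length →
    pvLastFlagValue params flag d m =
      ((params.zip (params.drop 1)).take m).foldl (pvStepF flag) d := by
  intro m
  induction m with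
  | zero => intro _; rfl
  | succ j ih =>
    intro hm
    have hj : j < (params.zip (params.drop 1)).length := by omega
    have hjn : j < params.length := by
      have h2 : (params.zip (params.drop 1)).length = params.length - 1 := by
        rw [List.length_zip, List.length_drop]; omega
      omega
    have hjn1 : j + 1 < params.length := by
      have h2 : (params.zip (params.drop 1)).length = params.length - 1 := by
        rw [List.length_zip, List.length_drop]; omega
      omega
    have hLj : (params.zip (params.drop 1))[j]'hj = (params[j], params[j + 1]) := by
      simp [List.getElem_zip]
    have htake : (params.zip (params.drop 1)).take (j + 1) =
        (params.zip (params.drop 1)).take j ++ [(params.zip (params.drop 1))[j]'hj] := by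
      rw [List.take_add_one, List.getElem?_eq_getElem hj]; rfl
    rw [htake, List.foldl_append]
    simp only [List.foldl_cons, List.foldl_nil]
    show (if PySem.List.pyGet? params (j : Int) = some flag then
        ((PySem.List.pyGet? params ((j : Int) + 1)).bind PySem.Int.ofStr?).getD 0
      else pvLastFlagValue params flag d j) = _
    have hget0 : PySem.List.pyGet? params (j : Int) = some params[j] := by
      rw [PySem.List.pyGet?_natCast, List.getElem?_eq_getElem hjn]
    by_cases hf : params[j] = flag
    · rw [hget0, hf, if_pos rfl]
      have hsome := hpre ((params.zip (params.drop 1))[j]'hj) (List.getElem_mem hj)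
        (by rw [hLj]; exact hf)
      rw [hLj] at hsome
      obtain ⟨v, hv⟩ := Option.isSome_iff_exists.mp hsome
      have hget1 : PySem.List.pyGet? params ((j : Int) + 1) = some params[j + 1] := by
        have : (j : Int) + 1 = ((j + 1 : Nat) : Int) := by push_cast; ring
        rw [this, PySem.List.pyGet?_natCast, List.getElem?_eq_getElem hjn1]
      rw [hget1]
      simp [pvStepF, hf, hv]
    · rw [hget0]
      rw [if_neg (by simpa using hf)]
      rw [ih (by omega)]
      simp [pvStepF, hf]

-- ===== VERDICT (by name: the statement is the Claim_ definition above) =====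
theorem get_colabfold_total_models_py_spec : Claim_equal_get_colabfold_total_models_py := by
  intro params _ hpre
  unfold Spec_get_colabfold_total_models_py
  unfold get_colabfold_total_models_py get_colabfold_total_models_py_alt
  have h := pvFoldA_suffix params params 0 (5, 1) rfl
  simp only [Nat.cast_zero, Nat.zero_add] at h
  rw [h, pvFold_pair]
  have hlen : (params.zip (params.drop 1)).length = params.length - 1 := by
    rw [List.length_zip, List.length_drop]; omega
  have hM := pvLastFlagValue_eq params "--num-models" 5
    (fun pr hm hf => hpre pr hm (Or.inl hf)) (params.zip (params.drop 1)).length le_rfl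
  have hS := pvLastFlagValue_eq params "--num-seeds" 1
    (fun pr hm hf => hpre pr hm (Or.inr hf)) (params.zip (params.drop 1)).length le_rfl
  rw [List.take_length, hlen] at hM hS
  rw [hM, hS]
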